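-- pv_equiv track=rewrite | github.com/AaPaul/Data-Structure-Algorithms | OAs/ArcticWolf/solution2.py | solution
-- ===== SOURCE A (Python) =====
-- def solution(words, variableName):
--     n = len(words)
--     l = len(variableName)
--     # visited = []
--     def check(lt, string):
--         if lt > l:
--             return False
--         if lt == l:
--             return string == variableName
--         for i in range(n):
--             # if i not in visited:
--             #     visited.append(i)
--             t = words[i]
--             ltt = len(t)
--             if t == variableName[lt: lt+ltt]:
--                 return check(lt+ltt, string+t)
--             elif t.title() == variableName[lt: lt+ltt]:
--                 return check(lt+ltt, string+t.title())
--                 # else: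
--                 #     visited.pop()
--                 #     continue
--         return False
--
--     ans = check(0, '')
--
--
--     return ans
-- ===== SOURCE B (Python) =====
-- def solution(words, variableName):
--     l = len(variableName)
--     lt = 0
--     while lt < l:
--         for t in words:
--             seg = variableName[lt:lt + len(t)]
--             if t == seg or t.title() == seg:
--                 lt += len(t)
--                 break
--         else:
--             return False
--     return True
-- ===== Notes on version B (the rewrite author's own statement) =====
-- stated objective: simpler
-- what changed: Replaces the recursive check(lt, string) with the accumulated string and its final string == variableName comparison (always true, since the accumulator is exactly the consumed prefix) by a plain iterative walk: an integer position advanced by the first word (raw or .title()) matching at that position, returning False as soon as no word matches.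
-- outside the precondition, e.g. on solution([''], 'x'): A raises RecursionError, B does not finish within the time limit; on solution(['a', ''], 'a'): A returns True, B returns True
import Mathlib
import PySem

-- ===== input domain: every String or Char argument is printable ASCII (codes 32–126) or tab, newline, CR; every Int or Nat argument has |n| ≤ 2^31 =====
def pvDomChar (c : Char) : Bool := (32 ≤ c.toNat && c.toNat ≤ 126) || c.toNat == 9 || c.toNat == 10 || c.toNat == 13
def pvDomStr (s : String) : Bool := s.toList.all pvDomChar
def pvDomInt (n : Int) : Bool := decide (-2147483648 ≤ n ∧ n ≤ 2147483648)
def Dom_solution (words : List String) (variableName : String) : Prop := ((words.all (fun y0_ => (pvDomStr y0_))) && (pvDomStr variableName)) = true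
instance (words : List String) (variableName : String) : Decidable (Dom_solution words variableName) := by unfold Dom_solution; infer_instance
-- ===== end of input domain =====

-- B replaces A's recursive check with its prefix-string accumulator by an iterative
-- position walk over the first matching word (objective: simpler).


-- str.title(), ported by hand (PySem has no title): a cased character is uppercased
-- after a non-cased character and lowercased otherwise; exact on the ASCII domain,
-- where 'cased' is exactly isAlpha and titlecase = uppercase.  Used by both ports.
def pyTitleGo (prevAlpha : Bool) : List Char → List Char
  | [] => []
  | c :: cs => (if prevAlpha then c.toLower else c.toUpper) :: pyTitleGo c.isAlpha cs

def pyTitle (cs : List Char) : List Char := pyTitleGo false cs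

-- the slice variableName[lt : lt+len(t)], shared by both ports
def pvSeg (vn : List Char) (lt : Int) (tl : List Char) : List Char :=
  PySem.List.slice vn (some lt) (some (lt + (tl.length : Int)))

-- ===== PORT A =====
-- A's inner 'for i in range(n)' loop; the continuation k is the recursive call to check.
def pvScanA (vn : List Char) (lt : Int) (k : Int → List Char → Bool) (string : List Char) :
    List String → Bool
  | [] => false
  | t :: rest =>
    if t.toList = pvSeg vn lt t.toList then
      k (lt + (t.toList.length : Int)) (string ++ t.toList)
    else if pyTitle t.toList = pvSeg vn lt t.toList then
      k (lt + (t.toList.length : Int)) (string ++ pyTitle t.toList)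
    else pvScanA vn lt k string rest

-- A's recursive check(lt, string).  fuel = len(variableName)+1 bounds the recursion
-- depth: under Pre_solution every matched word is nonempty, so lt strictly increases
-- and the fuel is never exhausted (outside Pre_ the Python recurses forever).
def pvCheckA (words : List String) (vn : List Char) : Nat → Int → List Char → Bool
  | 0, _, _ => false
  | Nat.succ fuel, lt, string =>
    if lt > (vn.length : Int) then false
    else if lt = (vn.length : Int) then decide (string = vn)
    else pvScanA vn lt (pvCheckA words vn fuel) string words

def solution (words : List String) (variableName : String) : Bool :=
  pvCheckA words variableName.toList (variableName.toList.length + 1) 0 []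

-- ===== PORT B =====
-- B's inner for/else: the first word matching (raw or title) at position lt, its length.
def pvFindStep (vn : List Char) (lt : Int) : List String → Option Nat
  | [] => none
  | t :: rest =>
    if t.toList = pvSeg vn lt t.toList || pyTitle t.toList = pvSeg vn lt t.toList then
      some t.toList.length
    else pvFindStep vn lt rest

-- B's while-loop; same fuel bound as A's port (the while loop spins forever outside Pre_).
def pvWalkB (words : List String) (vn : List Char) : Nat → Int → Bool
  | 0, _ => false
  | Nat.succ fuel, lt =>
    if lt < (vn.length : Int) then
      match pvFindStep vn lt words with
      | none => false
      | some kk => pvWalkB words vn fuel (lt + (kk : Int))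
    else true

def solution_alt (words : List String) (variableName : String) : Bool :=
  pvWalkB words variableName.toList (variableName.toList.length + 1) 0

-- ===== PRECONDITION & SPEC =====
-- Pre_ excludes a nonempty variableName with the empty string among the words: there
-- A's check can match '' without advancing and recurse forever (RecursionError), and
-- B's while loop spins likewise (on the inputs of this shape where earlier words do
-- consume all of variableName, A still returns, and B agrees with it there).
def Pre_solution (words : List String) (variableName : String) : Prop := variableName = "" ∨ "" ∉ words
instance (words : List String) (variableName : String) : Decidable (Pre_solution words variableName) := by unfold Pre_solution; infer_instance

def pvWitness_solution : List String × String := (["foo", "bar"], "fooBar")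

def Spec_solution (words : List String) (variableName : String) (out : Bool) : Prop := out = solution_alt words variableName
instance (words : List String) (variableName : String) (out : Bool) : Decidable (Spec_solution words variableName out) := by unfold Spec_solution; infer_instance

-- ===== CLAIM (what is proved, stated in full; the proofs are below) =====
def Claim_equal_solution : Prop := ∀ (words : List String) (variableName : String), Dom_solution words variableName → Pre_solution words variableName → Spec_solution words variableName (solution words variableName)

-- ===== LEMMAS AND PROOFS =====

theorem pyTitleGo_length (b : Bool) (cs : List Char) : (pyTitleGo b cs).length = cs.length := by
  induction cs generalizing b with
  | nil => rfl
  | cons c cs ih => simp [pyTitleGo, ih]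

-- A's inner loop, expressed through B's first-match search: on a match both of A's
-- branches append exactly the matched slice of variableName.
theorem scanA_eq_findStep (vn : List Char) (j : Nat) (k : Int → List Char → Bool)
    (string : List Char) (ws : List String) :
    pvScanA vn (j : Int) k string ws =
      match pvFindStep vn (j : Int) ws with
      | none => false
      | some kk => k ((j : Int) + (kk : Int)) (string ++ (vn.drop j).take kk) := by
  induction ws with
  | nil => rfl
  | cons t rest ih =>
    simp only [pvScanA, pvFindStep]
    generalize t.toList = tl
    by_cases h1 : tl = pvSeg vn (j : Int) tl
    · rw [if_pos h1, if_pos (by rw [decide_eq_true h1]; simp)]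
      exact congrArg (fun x => k ((j : Int) + (tl.length : Int)) (string ++ x))
        (h1.trans (PySem.List.slice_natCast_add vn j tl.length))
    · by_cases h2 : pyTitle tl = pvSeg vn (j : Int) tl
      · rw [if_neg h1, if_pos h2, if_pos (by rw [decide_eq_true h2]; simp)]
        exact congrArg (fun x => k ((j : Int) + (tl.length : Int)) (string ++ x))
          (h2.trans (PySem.List.slice_natCast_add vn j tl.length))
      · rw [if_neg h1, if_neg h2, if_neg (by simp [h1, h2])]
        exact ih

-- What a successful first-match search guarantees under Pre_: a positive step that
-- stays inside variableName.
theorem findStep_sound (vn : List Char) (j kk : Nat) (ws : List String)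
    (hw : ∀ t ∈ ws, t ≠ "") (h : pvFindStep vn (j : Int) ws = some kk) :
    1 ≤ kk ∧ j + kk ≤ vn.length := by
  induction ws with
  | nil => simp [pvFindStep] at h
  | cons t rest ih =>
    have htl : t.toList ≠ [] := fun hnil =>
      hw t List.mem_cons_self (String.toList_eq_nil_iff.mp hnil)
    simp only [pvFindStep] at h
    generalize hg : t.toList = tl at h htl
    by_cases hm : tl = pvSeg vn (j : Int) tl ∨ pyTitle tl = pvSeg vn (j : Int) tl
    · have hk : kk = tl.length := by
        rcases hm with hm | hm
        · rw [if_pos (by rw [decide_eq_true hm]; simp)] at h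
          exact (Option.some_inj.mp h).symm
        · rw [if_pos (by rw [decide_eq_true hm]; simp)] at h
          exact (Option.some_inj.mp h).symm
      have hslice : pvSeg vn (j : Int) tl = (vn.drop j).take tl.length :=
        PySem.List.slice_natCast_add vn j tl.length
      have hpos : 1 ≤ tl.length := by
        cases tl with
        | nil => exact absurd rfl htl
        | cons _ _ => simp
      have hlen : tl.length = min tl.length (vn.length - j) := by
        rcases hm with hm | hm
        · have := congrArg List.length hm
          simpa [hslice, List.length_take, List.length_drop] using this
        · have := congrArg List.length hm
          simpa [hslice, List.length_take, List.length_drop, pyTitle, pyTitleGo_length]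
            using this
      subst hk
      omega
    · rcases not_or.mp hm with ⟨hm1, hm2⟩
      rw [if_neg (by simp [hm1, hm2])] at h
      exact ih (fun t ht => hw t (List.mem_cons_of_mem _ ht)) h

-- Main invariant: at position j the accumulated string of A's check is exactly the
-- consumed prefix, and A's check agrees with B's walk while the fuel covers the rest.
theorem check_eq_walk (words : List String) (vn : List Char)
    (hw : ∀ t ∈ words, t ≠ "") :
    ∀ fuel (j : Nat), j ≤ vn.length → vn.length + 1 ≤ fuel + j →
      pvCheckA words vn fuel (j : Int) (vn.take j) = pvWalkB words vn fuel (j : Int) := by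
  intro fuel
  induction fuel with
  | zero => intro j hj hf; omega
  | succ fuel ih =>
    intro j hj hf
    simp only [pvCheckA, pvWalkB]
    by_cases hjl : j = vn.length
    · subst hjl
      simp [List.take_length]
    · have hlt : (j : Int) < (vn.length : Int) := by exact_mod_cast by omega
      rw [if_neg (by omega), if_neg (by exact_mod_cast hjl), if_pos hlt,
        scanA_eq_findStep]
      cases hstep : pvFindStep vn (j : Int) words with
      | none => rfl
      | some kk =>
        obtain ⟨h1, h2⟩ := findStep_sound vn j kk words hw hstep
        have hjk : (j : Int) + (kk : Int) = ((j + kk : Nat) : Int) := by push_cast; ring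
        show pvCheckA words vn fuel _ (List.take j vn ++ (vn.drop j).take kk) = _
        rw [← List.take_add, hjk]
        exact ih (j + kk) (by omega) (by omega)

-- ===== VERDICT (by name: the statement is the Claim_ definition above) =====
theorem solution_spec : Claim_equal_solution := by
  intro words variableName _ hpre
  unfold Spec_solution solution solution_alt
  rcases hpre with hv | hpre
  · subst hv
    simp [pvCheckA, pvWalkB]
  · have hw : ∀ t ∈ words, t ≠ "" := fun t ht he => hpre (he ▸ ht)
    have h := check_eq_walk words variableName.toList hw (variableName.toList.length + 1) 0
      (by omega) (by omega)
    simpa using h
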